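-- pv_equiv track=rewrite | github.com/apandey16/csc_323_lab0 | TaskD/vigenere.py | keyLength
-- ===== SOURCE A (Python) =====
-- def shiftString(inputStr: str):
--     result = '0' + inputStr[:-1]
--     return result
--
-- def countCoincidences(coincidences: list, msg: str, copy: str) -> list:
--     count = 0
--
--     for i, char in enumerate(msg):
--         if (copy[i] == char):
--             count += 1
--
--     coincidences.append(count)
--     return coincidences
--
-- def keyLength(msg: str) -> list:
--     coincidences = []
--     x = 0
--     copy = msg
--
--     while x < (len(msg)-10):
--         copy = shiftString(copy)
--         coincidences = countCoincidences(coincidences, msg, copy)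
--         x += 1
--
--     return coincidences
-- ===== SOURCE B (Python) =====
-- def keyLength(msg: str) -> list:
--     # One pass over shift amounts: no shifted copies are built; the '0'-prefix
--     # matches are kept as a running counter and offset matches use a zip.
--     res = []
--     zeros = 0
--     n = len(msg)
--     for k in range(1, n - 9):
--         zeros += msg[k - 1] == '0'
--         res.append(zeros + sum(a == b for a, b in zip(msg, msg[k:])))
--     return res
-- ===== Notes on version B (the rewrite author's own statement) =====
-- stated objective: alternative
-- what changed: A builds a freshly shifted copy string per offset and recounts matches against it; B never constructs copies: one loop over shift amounts with a running counter of matches against the shifted-in padding prefix plus a direct zip of the string against its own suffix.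
import Mathlib
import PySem

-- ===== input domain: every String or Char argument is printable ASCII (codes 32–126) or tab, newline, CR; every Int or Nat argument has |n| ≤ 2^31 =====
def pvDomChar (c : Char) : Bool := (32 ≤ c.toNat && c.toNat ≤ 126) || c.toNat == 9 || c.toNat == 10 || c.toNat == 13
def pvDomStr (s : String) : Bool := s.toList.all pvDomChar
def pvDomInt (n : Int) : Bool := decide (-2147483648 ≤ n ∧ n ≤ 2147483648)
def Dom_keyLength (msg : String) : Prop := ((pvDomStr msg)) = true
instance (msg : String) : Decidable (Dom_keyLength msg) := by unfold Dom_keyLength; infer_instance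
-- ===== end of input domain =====

-- B replaces A's repeated building of shifted copies (one fresh string per offset, each rescanned)
-- by a single loop over the shift amounts with a running counter of matches against the shifted-in
-- padding prefix and a direct zip of the string against its own suffix; no copy construction.

-- ===== PORT A =====
def shiftChars (inputStr : List Char) : List Char :=
  -- result = '0' + inputStr[:-1]
  '0' :: PySem.List.slice inputStr none (some (-1))

def countCoincidences (coincidences : List Int) (msg copy : List Char) : List Int :=
  -- count = 0; for i, char in enumerate(msg): if copy[i] == char: count += 1
  let count := (PySem.List.enumerate msg 0).foldl
    (fun count p => if PySem.List.pyGetD copy p.1 'A' == p.2 then count + 1 else count) (0 : Int)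
  coincidences ++ [count]

def klLoop (msg : List Char) (x : Int) (copy : List Char) (coincidences : List Int) : List Int :=
  if x < (msg.length : Int) - 10 then
    let copy' := shiftChars copy
    klLoop msg (x + 1) copy' (countCoincidences coincidences msg copy')
  else coincidences
termination_by ((msg.length : Int) - 10 - x).toNat
decreasing_by omega

def keyLength (msg : String) : List Int :=
  klLoop msg.toList 0 msg.toList []

-- ===== PORT B =====
def keyLength_alt (msg : String) : List Int :=
  let cs := msg.toList
  let n : Int := (cs.length : Int)
  ((PySem.List.pyRange 1 (n - 9) 1).foldl
    (fun (st : Int × List Int) k =>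
      let zeros := st.1 + (if PySem.List.pyGetD cs (k - 1) 'A' == '0' then (1 : Int) else 0)
      (zeros,
        st.2 ++ [zeros + ((cs.zip (PySem.List.slice cs (some k) none)).map
          (fun p => if p.1 == p.2 then (1 : Int) else 0)).sum]))
    ((0 : Int), ([] : List Int))).2

-- ===== PRECONDITION & SPEC =====
def Spec_keyLength (msg : String) (out : List Int) : Prop := out = keyLength_alt msg
instance (msg : String) (out : List Int) : Decidable (Spec_keyLength msg out) := by unfold Spec_keyLength; infer_instance

-- ===== CLAIM (what is proved, stated in full; the proofs are below) =====
def Claim_equal_keyLength : Prop := ∀ (msg : String), Dom_keyLength msg → Spec_keyLength msg (keyLength msg)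

-- ===== LEMMAS AND PROOFS =====

-- the coincidence count of msg against the copy shifted by k:
-- '0'-matches on the first k positions plus self-matches at offset k
def gVal (cs : List Char) (k : Nat) : Int :=
  ((cs.take k).countP (fun c => c == '0') : Int) + ((cs.zip (cs.drop k)).countP (fun p => p.1 == p.2) : Int)

theorem zip_take_len {α β : Type} : ∀ (xs : List α) (ys : List β), xs.zip (ys.take xs.length) = xs.zip ys := by
  intro xs
  induction xs with
  | nil => intro ys; simp
  | cons x xs ih =>
    intro ys
    cases ys with
    | nil => simp
    | cons y ys => simp [List.zip_cons_cons, ih]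

theorem zip_replicate_right {α β : Type} : ∀ (xs : List α) (n : Nat) (v : β), xs.length ≤ n →
    xs.zip (List.replicate n v) = xs.map (fun x => (x, v)) := by
  intro xs
  induction xs with
  | nil => intro n v _; simp
  | cons x xs ih =>
    intro n v h
    cases n with
    | zero => simp at h
    | succ n =>
      rw [List.replicate_succ, List.zip_cons_cons, ih n v (by simpa using h)]
      simp

-- L1: the enumerate/pyGetD counting fold of A is a countP over a zip
theorem cnt_fold_eq : ∀ (ms : List Char) (s : Nat) (copy : List Char) (acc : Int), s + ms.length ≤ copy.length →
    (PySem.List.enumerate ms (s : Int)).foldl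
      (fun c p => if PySem.List.pyGetD copy p.1 'A' == p.2 then c + 1 else c) acc
    = acc + ((ms.zip (copy.drop s)).countP (fun p => p.2 == p.1) : Int) := by
  intro ms
  induction ms with
  | nil => intro s copy acc _; simp [PySem.List.enumerate]
  | cons m ms ih =>
    intro s copy acc h
    have hs : s < copy.length := by simp at h; omega
    rw [PySem.List.enumerate_cons]
    simp only [List.foldl_cons]
    rw [List.drop_eq_getElem_cons hs, List.zip_cons_cons]
    have hcast : (s : Int) + 1 = ((s + 1 : Nat) : Int) := by push_cast; ring
    rw [hcast, ih (s + 1) copy _ (by simp at h ⊢; omega)]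
    simp only [PySem.List.pyGetD_natCast, List.getD_eq_getElem?_getD, List.getElem?_eq_getElem hs,
      Option.getD_some, List.countP_cons]
    by_cases hc : (copy[s] == m) = true
    · simp [hc]; ring
    · simp [hc]

-- L4: coincidences of cs with (replicate k '0' ++ take (n-k) cs) split into the two summands of gVal
theorem countP_shift_split (cs : List Char) (k : Nat) (hk : k ≤ cs.length) :
    ((cs.zip (List.replicate k '0' ++ cs.take (cs.length - k))).countP (fun p => p.2 == p.1) : Int)
    = gVal cs k := by
  have hsplit : cs.zip (List.replicate k '0' ++ cs.take (cs.length - k))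
      = (cs.take k).zip (List.replicate k '0') ++ (cs.drop k).zip (cs.take (cs.length - k)) := by
    have h := List.zip_append (l₁ := cs.take k) (r₁ := cs.drop k)
      (l₂ := List.replicate k '0') (r₂ := cs.take (cs.length - k))
      (by rw [List.length_take, List.length_replicate]; exact Nat.min_eq_left hk)
    rwa [List.take_append_drop] at h
  have h1 : (cs.take k).zip (List.replicate k '0') = (cs.take k).map (fun x => (x, '0')) :=
    zip_replicate_right _ k '0' (by rw [List.length_take]; exact min_le_left _ _)
  have h2 : (cs.drop k).zip (cs.take (cs.length - k)) = ((cs.zip (cs.drop k)).map Prod.swap) := by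
    have hlen : cs.length - k = (cs.drop k).length := by rw [List.length_drop]
    rw [hlen, zip_take_len, ← List.zip_swap]
  rw [hsplit, List.countP_append, h1, h2, List.countP_map, List.countP_map]
  unfold gVal
  have f1 : ((fun (p : Char × Char) => p.2 == p.1) ∘ (fun x : Char => (x, '0')))
      = (fun c : Char => c == '0') := by
    funext c; exact Bool.beq_comm
  have f2 : ((fun (p : Char × Char) => p.2 == p.1) ∘ Prod.swap)
      = (fun (p : Char × Char) => p.1 == p.2) := by
    funext p; rfl
  rw [f1, f2]
  push_cast
  ring

-- L2: shifting the k-times-shifted copy once more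
theorem shift_step (cs : List Char) (k : Nat) (hk : k < cs.length) :
    shiftChars (List.replicate k '0' ++ cs.take (cs.length - k))
    = List.replicate (k + 1) '0' ++ cs.take (cs.length - (k + 1)) := by
  unfold shiftChars
  rw [PySem.List.slice_to_neg_one]
  have hne : cs.take (cs.length - k) ≠ [] := by
    intro h
    have := congrArg List.length h
    simp [List.length_take] at this
    omega
  rw [List.dropLast_append_of_ne_nil hne, List.dropLast_eq_take, List.take_take,
    List.length_take]
  have h1 : min (cs.length - k) cs.length = cs.length - k := Nat.min_eq_left (by omega)
  have h2 : min (cs.length - k - 1) (cs.length - k) = cs.length - k - 1 := Nat.min_eq_left (by omega)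
  rw [h1, h2]
  have h3 : cs.length - k - 1 = cs.length - (k + 1) := by omega
  rw [h3, List.replicate_succ]
  simp

-- L3: A's while loop, characterised
theorem klLoop_eq (cs : List Char) : ∀ (fuel : Nat) (k : Nat) (co : List Int),
    fuel = cs.length - 10 - k → (k : Int) ≤ (cs.length : Int) - 10 →
    klLoop cs k (List.replicate k '0' ++ cs.take (cs.length - k)) co
    = co ++ (List.range (cs.length - 10 - k)).map (fun j => gVal cs (k + 1 + j)) := by
  intro fuel
  induction fuel with
  | zero =>
    intro k co h0 hk
    rw [klLoop]
    have hnot : ¬ ((k : Int) < (cs.length : Int) - 10) := by omega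
    rw [if_neg hnot, ← h0]
    simp
  | succ fuel ih =>
    intro k co h0 hk
    have hklt : (k : Int) < (cs.length : Int) - 10 := by omega
    have hkn : k < cs.length := by omega
    rw [klLoop, if_pos hklt]
    show klLoop cs ((k : Int) + 1)
        (shiftChars (List.replicate k '0' ++ cs.take (cs.length - k)))
        (countCoincidences co cs (shiftChars (List.replicate k '0' ++ cs.take (cs.length - k))))
      = co ++ (List.range (cs.length - 10 - k)).map (fun j => gVal cs (k + 1 + j))
    rw [shift_step cs k hkn]
    have hcc : countCoincidences co cs (List.replicate (k + 1) '0' ++ cs.take (cs.length - (k + 1)))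
        = co ++ [gVal cs (k + 1)] := by
      unfold countCoincidences
      have hlen : 0 + cs.length ≤ (List.replicate (k + 1) '0' ++ cs.take (cs.length - (k + 1))).length := by
        simp [List.length_take]; omega
      have := cnt_fold_eq cs 0 (List.replicate (k + 1) '0' ++ cs.take (cs.length - (k + 1))) 0 hlen
      simp only [Nat.cast_zero] at this
      rw [this, List.drop_zero, countP_shift_split cs (k + 1) (by omega)]
      simp
    rw [hcc]
    have harg : (k : Int) + 1 = ((k + 1 : Nat) : Int) := by push_cast; ring
    rw [harg, ih (k + 1) (co ++ [gVal cs (k + 1)]) (by omega) (by push_cast; omega)]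
    have hr : cs.length - 10 - k = fuel + 1 := h0.symm
    rw [hr, List.range_succ_eq_map, List.map_cons, List.map_map]
    have hfe : ∀ j ∈ List.range fuel, ((fun j => gVal cs (k + 1 + j)) ∘ Nat.succ) j
        = gVal cs (k + 1 + 1 + j) := by
      intro j _
      simp only [Function.comp_apply]
      congr 1
      omega
    rw [List.map_congr_left hfe]
    have hfuel : cs.length - 10 - (k + 1) = fuel := by omega
    rw [hfuel]
    simp

-- L5: B's fold, characterised
theorem bFold_eq (cs : List Char) : ∀ (fuel : Nat) (a : Nat) (r : List Int),
    fuel = cs.length - 9 - a → 1 ≤ a → a + 9 ≤ cs.length →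
    (PySem.List.pyRange (a : Int) ((cs.length : Int) - 9) 1).foldl
      (fun (st : Int × List Int) k =>
        let zeros := st.1 + (if PySem.List.pyGetD cs (k - 1) 'A' == '0' then (1 : Int) else 0)
        (zeros,
          st.2 ++ [zeros + ((cs.zip (PySem.List.slice cs (some k) none)).map
            (fun p => if p.1 == p.2 then (1 : Int) else 0)).sum]))
      ((((cs.take (a - 1)).countP (fun c => c == '0') : Nat) : Int), r)
    = ((((cs.take (cs.length - 10)).countP (fun c => c == '0') : Nat) : Int),
       r ++ (List.range (cs.length - 9 - a)).map (fun j => gVal cs (a + j))) := by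
  intro fuel
  induction fuel with
  | zero =>
    intro a r h0 ha han
    have hnil : PySem.List.pyRange (a : Int) ((cs.length : Int) - 9) 1 = [] :=
      PySem.List.pyRange_one_eq_nil (by omega)
    rw [hnil, List.foldl_nil]
    have h1 : a - 1 = cs.length - 10 := by omega
    have h2 : cs.length - 9 - a = 0 := by omega
    rw [h1, h2]
    simp
  | succ fuel ih =>
    intro a r h0 ha han
    have hlt : (a : Int) < (cs.length : Int) - 9 := by omega
    rw [PySem.List.pyRange_one_cons hlt, List.foldl_cons]
    have haxm : (a : Int) - 1 = ((a - 1 : Nat) : Int) := by omega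
    have hgd : PySem.List.pyGetD cs ((a : Int) - 1) 'A' = cs.getD (a - 1) 'A' := by
      rw [haxm, PySem.List.pyGetD_natCast]
    have hidx : a - 1 < cs.length := by omega
    have hzc : ((((cs.take (a - 1)).countP (fun c => c == '0') : Nat) : Int)
          + (if cs.getD (a - 1) 'A' == '0' then (1 : Int) else 0))
        = (((cs.take a).countP (fun c => c == '0') : Nat) : Int) := by
      have hta : cs.take a = cs.take (a - 1) ++ (cs[a - 1]'hidx) :: [] := by
        conv_lhs => rw [show a = (a - 1) + 1 from by omega]
        rw [List.take_add_one, List.getElem?_eq_getElem hidx]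
        rfl
      rw [hta, List.countP_append, List.getD_eq_getElem?_getD, List.getElem?_eq_getElem hidx]
      simp only [List.countP_cons, List.countP_nil, Option.getD_some]
      by_cases hc : (cs[a - 1]'hidx == '0') = true
      · simp [hc]
      · simp [hc]
    have hsum : ((cs.zip (PySem.List.slice cs (some (a : Int)) none)).map
          (fun p => if p.1 == p.2 then (1 : Int) else 0)).sum
        = (((cs.zip (cs.drop a)).countP (fun p => p.1 == p.2) : Nat) : Int) := by
      rw [PySem.List.slice_from cs (Int.natCast_nonneg a), Int.toNat_natCast,
        PySem.List.sum_map_ite_one_zero]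
    simp only [hgd, hzc, hsum]
    have harg : (a : Int) + 1 = ((a + 1 : Nat) : Int) := by push_cast; ring
    have ihx := ih (a + 1) (r ++ [gVal cs a]) (by omega) (by omega) (by omega)
    have hpre : (a + 1) - 1 = a := by omega
    rw [hpre] at ihx
    simp only [gVal, List.append_assoc, List.cons_append, List.nil_append] at ihx ⊢
    rw [harg, ihx]
    have hr : cs.length - 9 - a = fuel + 1 := h0.symm
    have hfuel : cs.length - 9 - (a + 1) = fuel := by omega
    rw [hr, hfuel, List.range_succ_eq_map, List.map_cons, List.map_map]
    simp [Function.comp, Nat.add_comm, Nat.add_left_comm]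

-- ===== VERDICT (by name: the statement is the Claim_ definition above) =====
theorem keyLength_spec : Claim_equal_keyLength := by
  intro msg _
  unfold Spec_keyLength keyLength keyLength_alt
  show klLoop msg.toList 0 msg.toList []
    = (List.foldl
        (fun (st : Int × List Int) (k : Int) =>
          (st.1 + (if PySem.List.pyGetD msg.toList (k - 1) 'A' == '0' then (1 : Int) else 0),
            st.2 ++ [(st.1 + (if PySem.List.pyGetD msg.toList (k - 1) 'A' == '0' then (1 : Int) else 0))
              + ((msg.toList.zip (PySem.List.slice msg.toList (some k) none)).map
                  (fun p => if p.1 == p.2 then (1 : Int) else 0)).sum]))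
        ((0 : Int), ([] : List Int))
        (PySem.List.pyRange 1 ((msg.toList.length : Int) - 9) 1)).2
  by_cases hn : 10 ≤ msg.toList.length
  · have hA := klLoop_eq msg.toList (msg.toList.length - 10) 0 [] (by omega) (by push_cast; omega)
    simp only [Nat.cast_zero, List.replicate_zero, List.nil_append, Nat.sub_zero,
      List.take_length, Nat.zero_add] at hA
    have hB := bFold_eq msg.toList (msg.toList.length - 9 - 1) 1 [] rfl (le_refl 1) (by omega)
    simp only [Nat.cast_one, Nat.sub_self, List.take_zero, List.countP_nil, Nat.cast_zero,
      List.nil_append] at hB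
    rw [hA, hB]
    have hlen : msg.toList.length - 9 - 1 = msg.toList.length - 10 := by omega
    rw [hlen]
  · have hA : ¬ ((0 : Int) < (msg.toList.length : Int) - 10) := by omega
    rw [klLoop, if_neg hA]
    have hB : PySem.List.pyRange 1 ((msg.toList.length : Int) - 9) 1 = [] :=
      PySem.List.pyRange_one_eq_nil (by omega)
    rw [hB, List.foldl_nil]
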